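-- pv_equiv track=rewrite | github.com/zkangHUST/LeetCodeSolution | Python/788.py | check
-- ===== SOURCE A (Python) =====
-- def check(n):
--     s = list(str(n))
--     if (s.count('3') or s.count('4') or s.count('7')):
--         return False
--     for i in range(len(s)):
--         if s[i] in [0,1,8]:
--             continue
--         if s[i] == '2':
--             s[i] = '5'
--         elif s[i] == '5':
--             s[i] = '2'
--         elif s[i] == '6':
--             s[i] = '9'
--         elif s[i] == '9':
--             s[i] = '6'
--     s = int(''.join(s))
--     if s != n:
--         return True
--     return False
-- ===== SOURCE B (Python) =====
-- def check(n):
--     # The rotated number differs from n exactly when some digit is self-changing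
--     # (2<->5, 6<->9); 3, 4, 7 are invalid. Single scan of str(n); '-' is untouched.
--     changed = False
--     for ch in str(n):
--         if ch in '347':
--             return False
--         if ch in '2569':
--             changed = True
--     return changed
-- ===== Notes on version B (the rewrite author's own statement) =====
-- stated objective: simpler
-- what changed: B replaces A's rotate-rebuild-reparse-compare pipeline (build char list, rewrite each digit in place, join, int(), compare to n) with a single scan of str(n) testing digit membership: fail on 3/4/7, succeed iff some digit in 2/5/6/9 occurs.
import Mathlib
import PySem

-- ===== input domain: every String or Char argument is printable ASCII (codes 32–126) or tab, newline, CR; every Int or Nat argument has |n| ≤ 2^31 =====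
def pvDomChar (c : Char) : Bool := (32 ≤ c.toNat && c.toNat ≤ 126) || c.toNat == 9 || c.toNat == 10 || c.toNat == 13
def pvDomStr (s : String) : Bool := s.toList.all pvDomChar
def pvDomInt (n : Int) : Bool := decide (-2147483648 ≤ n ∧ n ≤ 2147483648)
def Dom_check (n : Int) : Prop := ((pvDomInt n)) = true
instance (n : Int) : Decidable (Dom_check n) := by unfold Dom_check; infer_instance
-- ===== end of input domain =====

-- B replaces A's rotate-rebuild-reparse-compare pipeline with a single digit-membership scan
-- of str(n) (simpler; same asymptotic cost).

-- ===== PORT A =====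
-- Python's `s[i] in [0,1,8]` compares a 1-char str with ints: always False in Python 3.
def pyCharInIntList (c : Char) (xs : List Int) : Bool := false

-- one iteration of A's for-loop body (i is the running index, t the mutated list)
def rotStep (t : List Char) (i : Int) : List Char :=
  let c := PySem.List.pyGetD t i ' '
  if pyCharInIntList c [0, 1, 8] then t
  else if c = '2' then PySem.List.pySetD t i '5'
  else if c = '5' then PySem.List.pySetD t i '2'
  else if c = '6' then PySem.List.pySetD t i '9'
  else if c = '9' then PySem.List.pySetD t i '6'
  else t

-- int(''.join(s)) ported by hand (exact where A reaches it): the joined list is always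
-- str-of-int shaped — an optional '-' followed by decimal digits, never empty.
def digitsVal (ds : List Char) : Int :=
  ds.foldl (fun a c => 10 * a + ((c.toNat : Int) - 48)) 0

def intOfDigits (cs : List Char) : Int :=
  match cs with
  | [] => 0                     -- unreachable: str(n) is never empty
  | c :: ds => if c = '-' then -(digitsVal ds) else digitsVal (c :: ds)

def check (n : Int) : Bool :=
  let s := (PySem.Int.toStr n).toList
  if s.count '3' ≠ 0 || s.count '4' ≠ 0 || s.count '7' ≠ 0 then false
  else
    let s2 := (PySem.List.pyRange 0 (s.length : Int) 1).foldl rotStep s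
    let v := intOfDigits s2
    if v ≠ n then true else false

-- ===== PORT B =====
-- scan str(n): any of 3/4/7 → False; else True iff some digit of 2/5/6/9 was seen
def checkGo : List Char → Bool → Bool
  | [], changed => changed
  | c :: cs, changed =>
    if c = '3' ∨ c = '4' ∨ c = '7' then false
    else checkGo cs (changed || decide (c = '2' ∨ c = '5' ∨ c = '6' ∨ c = '9'))

def check_alt (n : Int) : Bool := checkGo (PySem.Int.toStr n).toList false

-- ===== PRECONDITION & SPEC =====
def Spec_check (n : Int) (out : Bool) : Prop := out = check_alt n
instance (n : Int) (out : Bool) : Decidable (Spec_check n out) := by unfold Spec_check; infer_instance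

-- ===== CLAIM (what is proved, stated in full; the proofs are below) =====
def Claim_equal_check : Prop := ∀ (n : Int), Dom_check n → Spec_check n (check n)

-- ===== LEMMAS AND PROOFS =====

-- the per-character rewrite A's loop performs
def rotC (c : Char) : Char :=
  if c = '2' then '5' else if c = '5' then '2'
  else if c = '6' then '9' else if c = '9' then '6' else c

theorem rotC_eq_self_iff (c : Char) :
    rotC c = c ↔ ¬(c = '2' ∨ c = '5' ∨ c = '6' ∨ c = '9') := by
  unfold rotC
  split_ifs with h1 h2 h3 h4
  · subst h1; decide
  · subst h2; decide
  · subst h3; decide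
  · subst h4; decide
  · simp [h1, h2, h3, h4]

theorem isDigit_rotC (c : Char) (h : c.isDigit = true) : (rotC c).isDigit = true := by
  unfold rotC; split_ifs with h1 h2 h3 h4
  · decide
  · decide
  · decide
  · decide
  · exact h

theorem rotC_dash : rotC '-' = '-' := by decide

-- A's loop, run from index pre.length on pre ++ post, maps rotC over post
theorem rotStep_mid (pre post : List Char) (c : Char) :
    rotStep (pre ++ c :: post) (pre.length : Int) = pre ++ rotC c :: post := by
  have hget : PySem.List.pyGetD (pre ++ c :: post) (pre.length : Int) ' ' = c := by
    rw [PySem.List.pyGetD_natCast]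
    simp [List.getD]
  have hset : ∀ v, PySem.List.pySetD (pre ++ c :: post) (pre.length : Int) v
      = pre ++ v :: post := by
    intro v
    rw [PySem.List.pySetD_natCast]
    simp
  unfold rotStep pyCharInIntList
  simp only [hget, Bool.false_eq_true, if_false]
  unfold rotC
  split_ifs <;> simp [hset]

theorem loop_map (post pre : List Char) :
    (PySem.List.pyRange (pre.length : Int) ((pre.length : Int) + (post.length : Int)) 1).foldl
      rotStep (pre ++ post) = pre ++ post.map rotC := by
  induction post generalizing pre with
  | nil => simp [PySem.List.pyRange_one_eq_nil (le_refl _)]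
  | cons c post ih =>
    rw [PySem.List.pyRange_one_cons (by push_cast [List.length_cons]; omega)]
    rw [List.foldl_cons, rotStep_mid]
    have harith : ((pre.length : Int) + 1) = ((pre ++ [rotC c]).length : Int) := by
      simp only [List.length_append, List.length_cons, List.length_nil]; push_cast; omega
    have harith2 : (pre.length : Int) + ((c :: post).length : Int)
        = ((pre ++ [rotC c]).length : Int) + (post.length : Int) := by
      simp only [List.length_append, List.length_cons, List.length_nil]; push_cast; omega
    rw [harith2, show pre ++ rotC c :: post = (pre ++ [rotC c]) ++ post by simp,
      harith, ih (pre ++ [rotC c])]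
    simp

-- digit-string value facts
theorem digitsVal_shift (ds : List Char) (a : Int) :
    ds.foldl (fun a c => 10 * a + ((c.toNat : Int) - 48)) a
      = a * 10 ^ ds.length + digitsVal ds := by
  induction ds generalizing a with
  | nil => simp [digitsVal]
  | cons c ds ih =>
    simp only [List.foldl_cons, List.length_cons, digitsVal]
    rw [ih, ih (10 * 0 + ((c.toNat : Int) - 48))]
    ring

theorem digitsVal_cons (c : Char) (ds : List Char) :
    digitsVal (c :: ds) = ((c.toNat : Int) - 48) * 10 ^ ds.length + digitsVal ds := by
  have := digitsVal_shift ds (10 * 0 + ((c.toNat : Int) - 48))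
  simp only [digitsVal, List.foldl_cons] at *
  rw [this]; ring

theorem isDigit_bounds (c : Char) (h : c.isDigit = true) : 48 ≤ c.toNat ∧ c.toNat ≤ 57 := by
  simp [Char.isDigit] at h
  obtain ⟨h1, h2⟩ := h
  exact ⟨UInt32.le_iff_toNat_le.mp h1, UInt32.le_iff_toNat_le.mp h2⟩

theorem digitsVal_nonneg (ds : List Char) (h : ∀ c ∈ ds, c.isDigit = true) :
    0 ≤ digitsVal ds := by
  induction ds with
  | nil => simp [digitsVal]
  | cons c ds ih =>
    rw [digitsVal_cons]
    have hb := isDigit_bounds c (h c (by simp))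
    have h1 : 0 ≤ digitsVal ds := ih (fun x hx => h x (by simp [hx]))
    have h2 : (0:Int) ≤ ((c.toNat : Int) - 48) := by omega
    positivity

theorem digitsVal_lt (ds : List Char) (h : ∀ c ∈ ds, c.isDigit = true) :
    digitsVal ds < 10 ^ ds.length := by
  induction ds with
  | nil => simp [digitsVal]
  | cons c ds ih =>
    rw [digitsVal_cons]
    have hb := isDigit_bounds c (h c (by simp))
    have h1 := ih (fun x hx => h x (by simp [hx]))
    have h2 : ((c.toNat : Int) - 48) ≤ 9 := by omega
    have h3 : ((c.toNat : Int) - 48) * 10 ^ ds.length ≤ 9 * 10 ^ ds.length := by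
      apply mul_le_mul_of_nonneg_right h2; positivity
    calc ((c.toNat : Int) - 48) * 10 ^ ds.length + digitsVal ds
        ≤ 9 * 10 ^ ds.length + digitsVal ds := by omega
      _ < 9 * 10 ^ ds.length + 10 ^ ds.length := by omega
      _ = 10 ^ (ds.length + 1) := by ring
      _ = 10 ^ (c :: ds).length := by simp

theorem digitsVal_inj (xs ys : List Char) (hlen : xs.length = ys.length)
    (hx : ∀ c ∈ xs, c.isDigit = true) (hy : ∀ c ∈ ys, c.isDigit = true)
    (h : digitsVal xs = digitsVal ys) : xs = ys := by
  induction xs generalizing ys with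
  | nil => cases ys with
    | nil => rfl
    | cons => simp at hlen
  | cons c cs ih =>
    cases ys with
    | nil => simp at hlen
    | cons d ds =>
      simp only [List.length_cons, add_left_inj] at hlen
      rw [digitsVal_cons, digitsVal_cons, hlen] at h
      have hc := isDigit_bounds c (hx c (by simp))
      have hd := isDigit_bounds d (hy d (by simp))
      have hcs : ∀ x ∈ cs, x.isDigit = true := fun x hxm => hx x (by simp [hxm])
      have hds : ∀ x ∈ ds, x.isDigit = true := fun x hxm => hy x (by simp [hxm])
      have h1 := digitsVal_nonneg cs hcs
      have h2 := digitsVal_lt cs hcs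
      have h3 := digitsVal_nonneg ds hds
      have h4 := digitsVal_lt ds hds
      rw [hlen] at h2
      have hv : (c.toNat : Int) = d.toNat := by
        by_contra hne
        rcases lt_or_gt_of_ne (fun he : (c.toNat:Int) = d.toNat => hne he) with hlt | hgt
        · nlinarith
        · nlinarith
      have hcd : c = d := by
        have : c.toNat = d.toNat := by exact_mod_cast hv
        exact Char.ext (UInt32.toNat_inj.mp this)
      subst hcd
      have : digitsVal cs = digitsVal ds := by omega
      rw [ih ds hlen hcs hds this]

theorem digitChar_toNat (r : Nat) (h : r < 10) : (Nat.digitChar r).toNat = r + 48 := by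
  interval_cases r <;> rfl

theorem digitsVal_append_singleton (xs : List Char) (c : Char) :
    digitsVal (xs ++ [c]) = 10 * digitsVal xs + ((c.toNat : Int) - 48) := by
  simp [digitsVal, List.foldl_append]

theorem digitsVal_toDigits (m : Nat) : digitsVal (Nat.toDigits 10 m) = (m : Int) := by
  induction m using Nat.strong_induction_on with
  | _ m ih =>
    by_cases hm : m < 10
    · rw [Nat.toDigits_of_lt_base hm]
      have := digitChar_toNat m hm
      simp [digitsVal, this]
    · have h10 : (10:Nat) * (m / 10) + m % 10 = m := by omega
      have hq : 0 < m / 10 := by omega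
      have hr : m % 10 < 10 := by omega
      have := Nat.toDigits_append_toDigits (b := 10) (n := m / 10) (d := m % 10) (by omega) hq hr
      rw [h10] at this
      rw [← this, Nat.toDigits_of_lt_base hr, digitsVal_append_singleton,
        ih (m / 10) (by omega), digitChar_toNat _ hr]
      push_cast
      omega

theorem toDigits_all_isDigit (m : Nat) : ∀ c ∈ Nat.toDigits 10 m, c.isDigit = true :=
  fun _ hc => Nat.isDigit_of_mem_toDigits (by omega) (le_refl 10) hc

theorem intOfDigits_neg (xs : List Char) : intOfDigits ('-' :: xs) = -(digitsVal xs) := by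
  rfl

theorem intOfDigits_of_digits (L : List Char) (hne : L ≠ [])
    (hd : ∀ c ∈ L, c.isDigit = true) : intOfDigits L = digitsVal L := by
  cases L with
  | nil => exact absurd rfl hne
  | cons c ds =>
    have hcne : ¬ c = '-' := by
      intro hc
      have := hd c (by simp)
      rw [hc] at this
      exact absurd this (by decide)
    simp [intOfDigits, hcne]

-- B's scan characterised
theorem checkGo_of_bad (L : List Char) (b : Bool)
    (h : ∃ c ∈ L, c = '3' ∨ c = '4' ∨ c = '7') : checkGo L b = false := by
  induction L generalizing b with
  | nil => simp at h
  | cons c cs ih =>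
    unfold checkGo
    rcases h with ⟨d, hd, hbad⟩
    rcases List.mem_cons.mp hd with rfl | hmem
    · rw [if_pos hbad]
    · split_ifs with h1
      · rfl
      · exact ih _ ⟨d, hmem, hbad⟩

theorem checkGo_of_good (L : List Char) (b : Bool)
    (h : ∀ c ∈ L, ¬(c = '3' ∨ c = '4' ∨ c = '7')) :
    checkGo L b = (b || L.any (fun c => decide (c = '2' ∨ c = '5' ∨ c = '6' ∨ c = '9'))) := by
  induction L generalizing b with
  | nil => simp [checkGo]
  | cons c cs ih =>
    unfold checkGo
    rw [if_neg (h c (by simp))]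
    rw [ih _ (fun x hx => h x (by simp [hx]))]
    simp [Bool.or_assoc]

-- the rotated list differs from the original exactly when a self-changing digit occurs
theorem map_eq_self_forall {f : Char → Char} :
    ∀ (L : List Char), L.map f = L → ∀ x ∈ L, f x = x
  | [], _, x, hx => absurd hx (by simp)
  | c :: L, h, x, hx => by
    simp only [List.map_cons, List.cons.injEq] at h
    rcases List.mem_cons.mp hx with rfl | hm
    · exact h.1
    · exact map_eq_self_forall L h.2 x hm

theorem map_rotC_ne (L : List Char) (c0 : Char) (hc0 : c0 ∈ L)
    (hch : c0 = '2' ∨ c0 = '5' ∨ c0 = '6' ∨ c0 = '9') : L.map rotC ≠ L := by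
  intro heq
  exact absurd ((rotC_eq_self_iff c0).mp (map_eq_self_forall L heq c0 hc0)) (by simp [hch])

-- digit facts about a mapped digit list
theorem map_rotC_all_isDigit (ds : List Char) (h : ∀ c ∈ ds, c.isDigit = true) :
    ∀ c ∈ ds.map rotC, c.isDigit = true := by
  intro c hc
  rcases List.mem_map.mp hc with ⟨x, hx, rfl⟩
  exact isDigit_rotC x (h x hx)

theorem digitsVal_map_rotC_ne (ds : List Char) (hds : ∀ c ∈ ds, c.isDigit = true)
    (c0 : Char) (hc0 : c0 ∈ ds) (hch : c0 = '2' ∨ c0 = '5' ∨ c0 = '6' ∨ c0 = '9') :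
    digitsVal (ds.map rotC) ≠ digitsVal ds := by
  intro he
  exact map_rotC_ne ds c0 hc0 hch
    (digitsVal_inj (ds.map rotC) ds (by simp) (map_rotC_all_isDigit ds hds) hds he)

-- ===== VERDICT (by name: the statement is the Claim_ definition above) =====
theorem check_spec : Claim_equal_check := by
  intro n _
  unfold Spec_check check check_alt
  rw [PySem.Int.toList_toStr]
  set L := PySem.Int.toChars n with hL
  by_cases hbad : '3' ∈ L ∨ '4' ∈ L ∨ '7' ∈ L
  · rw [if_pos (by simp [List.count_eq_zero]; tauto)]
    rcases hbad with h | h | h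
    · exact (checkGo_of_bad L false ⟨'3', h, by decide⟩).symm
    · exact (checkGo_of_bad L false ⟨'4', h, by decide⟩).symm
    · exact (checkGo_of_bad L false ⟨'7', h, by decide⟩).symm
  · push_neg at hbad
    have hgood : ∀ c ∈ L, ¬(c = '3' ∨ c = '4' ∨ c = '7') := by
      rintro c hc (rfl | rfl | rfl)
      · exact hbad.1 hc
      · exact hbad.2.1 hc
      · exact hbad.2.2 hc
    rw [if_neg (by simp [List.count_eq_zero]; tauto)]
    have hloop := loop_map L []
    simp only [List.nil_append, List.length_nil, Nat.cast_zero, zero_add] at hloop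
    rw [hloop, checkGo_of_good L false hgood, Bool.false_or]
    have hLdef : L = if n < 0 then '-' :: Nat.toDigits 10 n.natAbs
        else Nat.toDigits 10 n.toNat := by
      rw [hL]; rfl
    by_cases hch : ∃ c0 ∈ L, (c0 = '2' ∨ c0 = '5' ∨ c0 = '6' ∨ c0 = '9')
    · -- a self-changing digit: A's rotated value differs from n, B reports true
      have hany : L.any (fun c => decide (c = '2' ∨ c = '5' ∨ c = '6' ∨ c = '9')) = true := by
        rcases hch with ⟨c0, hc0, hc⟩
        exact List.any_eq_true.mpr ⟨c0, hc0, by simpa using hc⟩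
      rw [hany, if_pos]
      rcases hch with ⟨c0, hc0, hc⟩
      by_cases hn : n < 0
      · rw [if_pos hn] at hLdef
        set ds := Nat.toDigits 10 n.natAbs with hds0
        have hds : ∀ c ∈ ds, c.isDigit = true := toDigits_all_isDigit _
        have hc0ds : c0 ∈ ds := by
          rw [hLdef] at hc0
          rcases List.mem_cons.mp hc0 with rfl | hm
          · rcases hc with h | h | h | h <;> exact absurd h (by decide)
          · exact hm
        have hvL : digitsVal ds = (n.natAbs : Int) := by
          rw [hds0, digitsVal_toDigits]
        rw [hLdef]
        simp only [List.map_cons, rotC_dash, intOfDigits_neg]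
        intro he
        have := digitsVal_map_rotC_ne ds hds c0 hc0ds hc
        apply this
        rw [hvL]
        omega
      · rw [if_neg hn] at hLdef
        push_neg at hn
        have hds : ∀ c ∈ L, c.isDigit = true := hLdef ▸ toDigits_all_isDigit _
        have hvL : digitsVal L = n := by
          rw [hLdef, digitsVal_toDigits, Int.toNat_of_nonneg hn]
        have hne : L.map rotC ≠ [] := by
          rw [hLdef]; simp
          have := @Nat.length_toDigits_pos 10 n.toNat
          intro h0; rw [h0] at this; simp at this
        rw [intOfDigits_of_digits (L.map rotC) hne (map_rotC_all_isDigit L hds)]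
        intro he
        exact digitsVal_map_rotC_ne L hds c0 hc0 hc (by rw [he, hvL])
    · -- no self-changing digit: A's rotation is the identity, both report false
      have hfix : ∀ c ∈ L, rotC c = c := by
        intro c hc
        rw [rotC_eq_self_iff]
        exact fun h => hch ⟨c, hc, h⟩
      have hmap : L.map rotC = L := by simp [List.map_congr_left hfix]
      have hany : L.any (fun c => decide (c = '2' ∨ c = '5' ∨ c = '6' ∨ c = '9')) = false := by
        simp only [List.any_eq_false, decide_eq_true_eq]
        exact fun c hc h => hch ⟨c, hc, h⟩
      rw [hany, hmap, if_neg]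
      simp only [ne_eq, not_not]
      by_cases hn : n < 0
      · rw [if_pos hn] at hLdef
        rw [hLdef, intOfDigits_neg, digitsVal_toDigits]
        omega
      · rw [if_neg hn] at hLdef
        push_neg at hn
        have hds : ∀ c ∈ L, c.isDigit = true := hLdef ▸ toDigits_all_isDigit _
        have hne : L ≠ [] := by
          rw [hLdef]
          have := @Nat.length_toDigits_pos 10 n.toNat
          intro h0; rw [h0] at this; simp at this
        rw [intOfDigits_of_digits L hne hds, hLdef, digitsVal_toDigits,
          Int.toNat_of_nonneg hn]
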